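-- pv_equiv track=rewrite | github.com/euccas/IntermediatePython | iteration/Pairwise.py | pairwise
-- ===== SOURCE A (Python) =====
-- def pairwise(iterable):
--     i = iter(iterable)
--     stop = False
--     while not stop:
--         curr = next(i)
--         try:
--             cnext = next(i)
--         except StopIteration:
--             cnext = None
--             stop = True
--         yield(curr, cnext)
-- ===== SOURCE B (Python) =====
-- def pairwise(iterable):
--     prev = None
--     have_prev = False
--     for x in iterable:
--         if have_prev:
--             yield (prev, x)
--             have_prev = False
--         else:
--             prev = x
--             have_prev = True
--     if have_prev:
--         yield (prev, None)
-- ===== Notes on version B (the rewrite author's own statement) =====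
-- stated objective: simpler
-- what changed: Replaces the while-True/next/next/try-except generator with a plain for-loop over the iterable that keeps a one-element buffer and a flag, flushing the buffer as (prev, None) after the loop; this never calls next() and so never trips PEP 479.
-- crash fix: On every even-length input (including the empty one) A raises RuntimeError because a bare next() exhausts the iterator inside the generator (PEP 479); B returns the list of complete pairs there (the empty list for empty input). — e.g. on pairwise([1, 2]): A raises RuntimeError, B returns [(1, some 2)]
import Mathlib
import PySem

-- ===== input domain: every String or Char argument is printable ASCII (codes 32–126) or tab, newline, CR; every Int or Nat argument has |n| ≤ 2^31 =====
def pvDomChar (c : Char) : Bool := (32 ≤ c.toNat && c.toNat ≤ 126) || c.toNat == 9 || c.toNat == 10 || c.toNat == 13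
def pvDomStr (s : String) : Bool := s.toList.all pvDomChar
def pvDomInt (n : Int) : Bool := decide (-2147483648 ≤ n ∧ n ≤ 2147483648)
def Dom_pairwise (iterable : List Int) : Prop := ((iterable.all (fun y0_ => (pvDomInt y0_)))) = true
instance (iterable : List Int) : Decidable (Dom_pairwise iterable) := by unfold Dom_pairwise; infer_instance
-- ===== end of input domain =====

-- B replaces A's while/next/next/try-except generator with a single for-loop holding a
-- one-element buffer and a flag (objective: simpler); equivalence is proved on odd-length inputs.


-- ===== PORT A =====
-- A pulls two items per loop iteration: curr = next(i); cnext = next(i) or None at the end.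
def pairwise : List Int → List (Int × Option Int)
  | [] => []
  | [x] => [(x, none)]
  | x :: y :: rest => (x, some y) :: pairwise rest

-- ===== PORT B =====
-- one step of B's for-loop: state = (yielded so far, buffered element or none)
def pairwiseAltStep (st : List (Int × Option Int) × Option Int) (x : Int) :
    List (Int × Option Int) × Option Int :=
  match st.2 with
  | some p => (st.1 ++ [(p, some x)], none)
  | none => (st.1, some x)

def pairwise_alt (iterable : List Int) : List (Int × Option Int) :=
  let s := iterable.foldl pairwiseAltStep ([], none)
  match s.2 with
  | some p => s.1 ++ [(p, none)]
  | none => s.1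

-- ===== PRECONDITION & SPEC =====
-- Pre_ excludes exactly the inputs where A raises: on every even-length list (including [])
-- the final bare next(i) raises StopIteration, which PEP 479 turns into RuntimeError.
def Pre_pairwise (iterable : List Int) : Prop := iterable.length % 2 = 1
instance (iterable : List Int) : Decidable (Pre_pairwise iterable) := by unfold Pre_pairwise; infer_instance
def pvWitness_pairwise : List Int := ([1, 2, 3])

-- On every even-length input (including the empty one) A raises RuntimeError (PEP 479:
-- a bare next() exhausts the iterator inside the generator); B returns the list of complete pairs there.
def Raises_pairwise (iterable : List Int) : Prop := iterable.length % 2 = 0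
instance (iterable : List Int) : Decidable (Raises_pairwise iterable) := by unfold Raises_pairwise; infer_instance
def pvRaiseWitness_pairwise : List Int := ([1, 2])
def pvRaiseWitnessOut_pairwise : List (Int × Option Int) := [(1, some 2)]

def Spec_pairwise (iterable : List Int) (out : List (Int × Option Int)) : Prop := out = pairwise_alt iterable
instance (iterable : List Int) (out : List (Int × Option Int)) : Decidable (Spec_pairwise iterable out) := by unfold Spec_pairwise; infer_instance

-- ===== CLAIM (what is proved, stated in full; the proofs are below) =====
def Claim_equal_pairwise : Prop := ∀ (iterable : List Int), Dom_pairwise iterable → Pre_pairwise iterable → Spec_pairwise iterable (pairwise iterable)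
def Claim_raises_pairwise : Prop := (∀ (iterable : List Int), Dom_pairwise iterable → Raises_pairwise iterable → ¬ Pre_pairwise iterable) ∧ (Dom_pairwise (pvRaiseWitness_pairwise) ∧ Raises_pairwise (pvRaiseWitness_pairwise) ∧ pairwise_alt (pvRaiseWitness_pairwise) = pvRaiseWitnessOut_pairwise)

-- ===== LEMMAS AND PROOFS =====
-- B's fold starting from (acc, none) ends as acc ++ pairwise xs (A's chunking), for every accumulator.
theorem pairwise_alt_invariant (xs : List Int) : ∀ (acc : List (Int × Option Int)),
    (match (List.foldl pairwiseAltStep (acc, none) xs).2 with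
      | some p => (List.foldl pairwiseAltStep (acc, none) xs).1 ++ [(p, none)]
      | none => (List.foldl pairwiseAltStep (acc, none) xs).1) = acc ++ pairwise xs := by
  induction xs using pairwise.induct with
  | case1 => intro acc; simp [pairwise]
  | case2 x => intro acc; simp [pairwise, pairwiseAltStep]
  | case3 x y rest ih =>
      intro acc
      simpa [pairwise, pairwiseAltStep] using ih (acc ++ [(x, some y)])

-- ===== VERDICT (by name: the statement is the Claim_ definition above) =====
theorem pairwise_spec : Claim_equal_pairwise := by
  intro iterable _ _
  unfold Spec_pairwise pairwise_alt
  exact (by simpa using (pairwise_alt_invariant iterable []).symm)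

@[simp] theorem pairwise_raises : Claim_raises_pairwise := by
  unfold Claim_raises_pairwise
  exact ⟨fun it _ hr hp => by unfold Raises_pairwise at hr; unfold Pre_pairwise at hp; omega, by decide⟩
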